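-- pv_equiv track=rewrite | github.com/eggnee/Algorithm | 프로그래머스/1/155652. 둘만의 암호/둘만의 암호.py | solution
-- ===== SOURCE A (Python) =====
-- def toAlpha(alpha):
--     return chr((alpha - 97) % 26 + 97)
--
-- def solution(s, skip, index):
--     answer = ''
--     for i in s:
--         alpha = ord(i)
--         for _ in range(index):
--             alpha += 1
--             while toAlpha(alpha) in skip:
--                 alpha += 1
--         answer += toAlpha(alpha)
--     return answer
-- ===== SOURCE B (Python) =====
-- def solution(s, skip, index):
--     # closed form: precompute the allowed letter residues once, then index cyclically
--     allowed = [r for r in range(26) if chr(r + 97) not in skip]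
--     m = len(allowed)
--     out = []
--     for c in s:
--         r = (ord(c) - 97) % 26
--         if index <= 0:
--             out.append(chr(r + 97))
--         else:
--             pos = sum(1 for a in allowed if a <= r)
--             out.append(chr(allowed[(pos + index - 1) % m] + 97))
--     return ''.join(out)
-- ===== Notes on version B (the rewrite author's own statement) =====
-- stated objective: faster
-- what changed: Instead of simulating index single-letter advances per character (each advance scanning skip), B precomputes the 26-entry table of allowed letter residues once and lands each character directly with one modular index (pos + index - 1) mod m.
import Mathlib
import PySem

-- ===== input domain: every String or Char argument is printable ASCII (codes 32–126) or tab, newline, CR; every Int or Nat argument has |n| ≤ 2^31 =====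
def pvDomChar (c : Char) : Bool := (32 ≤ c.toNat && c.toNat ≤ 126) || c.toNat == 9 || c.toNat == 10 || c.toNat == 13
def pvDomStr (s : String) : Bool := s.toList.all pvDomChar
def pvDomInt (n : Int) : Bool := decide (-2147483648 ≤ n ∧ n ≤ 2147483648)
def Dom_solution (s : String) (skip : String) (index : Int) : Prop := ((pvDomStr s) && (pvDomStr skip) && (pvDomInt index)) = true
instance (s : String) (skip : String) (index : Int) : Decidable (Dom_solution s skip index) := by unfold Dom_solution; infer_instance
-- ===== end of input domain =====

-- B replaces A's per-character simulation of `index` letter-advances (each scanning `skip`)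
-- by a once-precomputed table of allowed letter residues and a single modular index per character.


-- ===== PORT A =====
def toAlpha (alpha : Int) : Char := Char.ofNat ((PySem.Int.mod (alpha - 97) 26 + 97).toNat)

-- `while toAlpha(alpha) in skip: alpha += 1` — fuel 26 suffices: the 26 consecutive values
-- cover every residue mod 26, and Pre_ guarantees some letter is not in skip (else Python diverges).
def whileSkip (fuel : Nat) (alpha : Int) (skipL : List Char) : Int :=
  match fuel with
  | 0 => alpha
  | f + 1 => if skipL.contains (toAlpha alpha) then whileSkip f (alpha + 1) skipL else alpha

def solution (s : String) (skip : String) (index : Int) : String :=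
  String.mk (s.toList.foldl (fun answer i =>
    let alpha : Int := (i.toNat : Int)
    let alpha := (List.range index.toNat).foldl (fun a _ => whileSkip 26 (a + 1) skip.toList) alpha
    answer ++ [toAlpha alpha]) [])

-- ===== PORT B =====
def solution_alt (s : String) (skip : String) (index : Int) : String :=
  let allowed := (List.range 26).filter (fun r => !(skip.toList.contains (Char.ofNat (r + 97))))
  let m : Int := (allowed.length : Int)
  String.mk (s.toList.foldl (fun out c =>
    let r : Nat := (PySem.Int.mod ((c.toNat : Int) - 97) 26).toNat
    if index ≤ 0 then out ++ [Char.ofNat (r + 97)]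
    else
      let pos : Int := (allowed.countP (fun a => a ≤ r) : Int)
      out ++ [Char.ofNat (allowed.getD (PySem.Int.mod (pos + index - 1) m).toNat 0 + 97)]) [])

-- ===== PRECONDITION & SPEC =====
-- Pre_ excludes only the inputs where A diverges (infinite while loop): index ≥ 1, s nonempty,
-- and every lowercase letter occurs in skip.
def Pre_solution (s : String) (skip : String) (index : Int) : Prop :=
  index ≤ 0 ∨ s.toList = [] ∨ ∃ r ∈ List.range 26, ¬ skip.toList.contains (Char.ofNat (r + 97))
instance (s : String) (skip : String) (index : Int) : Decidable (Pre_solution s skip index) := by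
  unfold Pre_solution; infer_instance

def pvWitness_solution : String × String × Int := ("aukks", "wbqd", 5)

def Spec_solution (s : String) (skip : String) (index : Int) (out : String) : Prop := out = solution_alt s skip index
instance (s : String) (skip : String) (index : Int) (out : String) : Decidable (Spec_solution s skip index out) := by unfold Spec_solution; infer_instance

-- ===== CLAIM (what is proved, stated in full; the proofs are below) =====
def Claim_equal_solution : Prop := ∀ (s : String) (skip : String) (index : Int), Dom_solution s skip index → Pre_solution s skip index → Spec_solution s skip index (solution s skip index)


-- ===== LEMMAS AND PROOFS =====

-- allowed-residue predicate derived from skip, and the allowed-residue table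
def pA (skipL : List Char) (x : Nat) : Bool := !(skipL.contains (Char.ofNat (x + 97)))
def RL (skipL : List Char) : List Nat := (List.range 26).filter (pA skipL)
-- residue of an alpha value: which lowercase letter toAlpha yields
def res (beta : Int) : Nat := ((beta - 97) % 26).toNat
-- whileSkip projected onto residues
def wres (p : Nat → Bool) : Nat → Nat → Nat
  | 0, a => a
  | f + 1, a => if p a then a else wres p f ((a + 1) % 26)
-- the outer `for _ in range(index)` loop of A
def iterA (skipL : List Char) (k : Nat) (beta : Int) : Int :=
  (List.range k).foldl (fun a _ => whileSkip 26 (a + 1) skipL) beta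

theorem res_lt (beta : Int) : res beta < 26 := by unfold res; omega

theorem res_succ (beta : Int) : res (beta + 1) = (res beta + 1) % 26 := by unfold res; omega

theorem toAlpha_eq (beta : Int) : toAlpha beta = Char.ofNat (res beta + 97) := by
  unfold toAlpha res
  rw [PySem.Int.mod_eq_emod_of_pos (by norm_num)]
  congr 1
  omega

theorem bridge (skipL : List Char) (f : Nat) (beta : Int) :
    res (whileSkip f beta skipL) = wres (pA skipL) f (res beta) := by
  induction f generalizing beta with
  | zero => rfl
  | succ f ih =>
    simp only [whileSkip, wres, toAlpha_eq, pA]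
    by_cases h : Char.ofNat (res beta + 97) ∈ skipL
    · simp [h, ih, res_succ]
    · simp [h]

theorem wres_eq (p : Nat → Bool) (f a j : Nat) (hj : j < f)
    (hlow : ∀ i < j, p ((a + i) % 26) = false) (ht : p ((a + j) % 26) = true)
    (ha : a < 26) : wres p f a = (a + j) % 26 := by
  induction f generalizing a j with
  | zero => omega
  | succ f ih =>
    by_cases h : p a
    · have hj0 : j = 0 := by
        by_contra hne
        have := hlow 0 (by omega)
        have e : (a + 0) % 26 = a := by omega
        rw [e] at this
        simp [h] at this
      subst hj0
      simp [wres, h, Nat.mod_eq_of_lt ha]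
    · have hj0 : j ≠ 0 := by
        intro he; subst he
        have e : (a + 0) % 26 = a := by omega
        rw [e] at ht
        simp [ht] at h
      have := ih ((a + 1) % 26) (j - 1) (by omega)
        (fun i hi => by
          have := hlow (i + 1) (by omega)
          have e : ((a + 1) % 26 + i) % 26 = (a + (i + 1)) % 26 := by omega
          rw [e]; exact this)
        (by
          have e : ((a + 1) % 26 + (j - 1)) % 26 = (a + j) % 26 := by omega
          rw [e]; exact ht)
        (by omega)
      have hw : wres p (f + 1) a = wres p f ((a + 1) % 26) := by simp [wres, h]
      rw [hw, this]
      omega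

theorem mem_RL (skipL : List Char) (x : Nat) : x ∈ RL skipL ↔ x < 26 ∧ pA skipL x = true := by
  simp [RL, List.mem_filter, List.mem_range]

theorem sorted_RL (skipL : List Char) : (RL skipL).Pairwise (· < ·) :=
  List.Pairwise.filter _ List.pairwise_lt_range

-- head of a sorted list is its minimum
theorem head_min {t : Nat} {rest : List Nat} (hs : (t :: rest).Pairwise (· < ·))
    {x : Nat} (hx : x ∈ t :: rest) : t ≤ x := by
  rw [List.mem_cons] at hx
  rcases hx with rfl | hx
  · exact le_refl _
  · exact le_of_lt ((List.pairwise_cons.1 hs).1 x hx)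

-- the core step: one pass of A's `alpha += 1; while … alpha += 1` lands on the table entry
theorem step_core (skipL : List Char) (r : Nat) (hr : r < 26) (hR : RL skipL ≠ []) :
    wres (pA skipL) 26 ((r + 1) % 26) =
      (RL skipL).getD ((RL skipL).countP (fun a => a ≤ r) % (RL skipL).length) 0 := by
  have hsplit : (26 : Nat) = (r + 1) + (25 - r) := by omega
  have hrange : List.range 26 = List.range (r + 1) ++ (List.range (25 - r)).map ((r + 1) + ·) := by
    rw [hsplit, List.range_add]
  have hRdec : RL skipL = (List.range (r + 1)).filter (pA skipL) ++
      ((List.range (25 - r)).map ((r + 1) + ·)).filter (pA skipL) := by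
    rw [RL, hrange, List.filter_append]
  set R1 := (List.range (r + 1)).filter (pA skipL) with hR1
  set R2 := ((List.range (25 - r)).map ((r + 1) + ·)).filter (pA skipL) with hR2
  have hmemR1 : ∀ x ∈ R1, x ≤ r := by
    intro x hx
    have := (List.mem_filter.1 hx).1
    simp [List.mem_range] at this
    omega
  have hmemR2 : ∀ x ∈ R2, r + 1 ≤ x ∧ x ≤ 25 := by
    intro x hx
    have := (List.mem_filter.1 hx).1
    simp [List.mem_range] at this
    omega
  have hpos : (RL skipL).countP (fun a => a ≤ r) = R1.length := by
    rw [hRdec, List.countP_append]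
    have h1 : R1.countP (fun a => a ≤ r) = R1.length :=
      List.countP_eq_length.2 (fun x hx => by simpa using hmemR1 x hx)
    have h2 : R2.countP (fun a => a ≤ r) = 0 :=
      List.countP_eq_zero.2 (fun x hx => by simp; exact (hmemR2 x hx).1)
    omega
  have hRL_pA : ∀ x, x ∈ RL skipL ↔ x < 26 ∧ pA skipL x = true := mem_RL skipL
  rcases hR2e : R2 with _ | ⟨t, rest⟩
  · -- no allowed residue above r: wrap to the minimum (head) of the table
    have hR1ne : R1 ≠ [] := by
      intro h; rw [hRdec, h, hR2e] at hR; simp at hR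
    rcases hR1e : R1 with _ | ⟨t, rest⟩
    · exact absurd hR1e hR1ne
    have hRLe : RL skipL = t :: rest := by rw [hRdec, hR1e, hR2e]; simp
    have hposm : (RL skipL).countP (fun a => a ≤ r) % (RL skipL).length = 0 := by
      rw [hpos, hRdec, hR2e]; simp [Nat.mod_self]
    rw [hposm, hRLe]
    have htmem : t ∈ RL skipL := by rw [hRLe]; exact List.mem_cons_self
    have htr : t ≤ r := hmemR1 t (by rw [hR1e]; exact List.mem_cons_self)
    have hsort : (t :: rest).Pairwise (· < ·) := by rw [← hRLe]; exact sorted_RL skipL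
    -- j = cyclic distance from (r+1)%26 to t
    have hnone_above : ∀ x, r < x → x < 26 → pA skipL x = false := by
      intro x h1 h2
      by_contra hfx
      have hx : x ∈ RL skipL := (hRL_pA x).2 ⟨h2, by simpa using hfx⟩
      rw [hRdec, hR2e, List.append_nil] at hx
      have := hmemR1 x hx; omega
    have hnone_below : ∀ x, x < t → pA skipL x = false := by
      intro x h1
      by_contra hfx
      have hx : x ∈ RL skipL := (hRL_pA x).2 ⟨by omega, by simpa using hfx⟩
      rw [hRLe] at hx
      have := head_min hsort hx; omega
    have ht26 : t < 26 := by omega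
    have hpt : pA skipL t = true := ((hRL_pA t).1 htmem).2
    by_cases hr25 : r = 25
    · subst hr25
      have : (25 + 1) % 26 = 0 := by norm_num
      rw [this]
      rw [wres_eq (pA skipL) 26 0 t (by omega)
        (fun i hi => by rw [Nat.mod_eq_of_lt (by omega)]; exact hnone_below _ (by omega))
        (by rw [Nat.mod_eq_of_lt (by omega)]; simpa using hpt) (by omega)]
      simp [Nat.mod_eq_of_lt ht26]
    · have ha : (r + 1) % 26 = r + 1 := Nat.mod_eq_of_lt (by omega)
      rw [ha]
      rw [wres_eq (pA skipL) 26 (r + 1) (25 - r + t) (by omega)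
        (fun i hi => by
          by_cases hc : i < 25 - r
          · rw [Nat.mod_eq_of_lt (by omega)]; exact hnone_above _ (by omega) (by omega)
          · have e : (r + 1 + i) % 26 = i - (25 - r) := by omega
            rw [e]; exact hnone_below _ (by omega))
        (by have e : (r + 1 + (25 - r + t)) % 26 = t := by omega
            rw [e]; exact hpt) (by omega)]
      have e : (r + 1 + (25 - r + t)) % 26 = t := by omega
      rw [e]
      rfl
  · -- there is an allowed residue above r: land on the least one
    have hRLe : RL skipL = R1 ++ t :: rest := by rw [hRdec, hR2e]
    have hlen : R1.length < (RL skipL).length := by rw [hRLe]; simp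
    have hposm : (RL skipL).countP (fun a => a ≤ r) % (RL skipL).length = R1.length := by
      rw [hpos, Nat.mod_eq_of_lt hlen]
    rw [hposm]
    have hget : (RL skipL).getD R1.length 0 = t := by
      rw [hRLe, List.getD_append_right R1 (t :: rest) 0 R1.length (le_refl _)]
      simp
    rw [hget]
    have htmem2 : t ∈ R2 := by rw [hR2e]; exact List.mem_cons_self
    have htb := hmemR2 t htmem2
    have hsort2 : (t :: rest).Pairwise (· < ·) := by
      rw [← hR2e]
      exact List.Pairwise.filter _ (List.Pairwise.map _ (fun a b h => by omega) List.pairwise_lt_range)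
    have hpt : pA skipL t = true := by
      have hx : t ∈ RL skipL := by
        rw [hRLe]; exact List.mem_append.2 (Or.inr List.mem_cons_self)
      exact ((hRL_pA t).1 hx).2
    have hnone_mid : ∀ x, r < x → x < t → pA skipL x = false := by
      intro x h1 h2
      by_contra hfx
      have hx : x ∈ RL skipL := (hRL_pA x).2 ⟨by omega, by simpa using hfx⟩
      rw [hRLe] at hx
      rcases List.mem_append.1 hx with hx1 | hx2
      · have := hmemR1 x hx1; omega
      · have := head_min hsort2 hx2; omega
    have ha : (r + 1) % 26 = r + 1 := Nat.mod_eq_of_lt (by omega)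
    rw [ha]
    rw [wres_eq (pA skipL) 26 (r + 1) (t - (r + 1)) (by omega)
      (fun i hi => by rw [Nat.mod_eq_of_lt (by omega)]; exact hnone_mid _ (by omega) (by omega))
      (by have e : (r + 1 + (t - (r + 1))) % 26 = t := by omega
          rw [e]; exact hpt) (by omega)]
    omega

-- counting ≤ the q-th table entry gives q+1 (the table is strictly sorted)
theorem count_le_getD (skipL : List Char) (q : Nat) (hq : q < (RL skipL).length) :
    (RL skipL).countP (fun a => a ≤ (RL skipL).getD q 0) = q + 1 := by
  have hsort := sorted_RL skipL
  rw [List.pairwise_iff_getElem] at hsort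
  have hgetD : (RL skipL).getD q 0 = (RL skipL)[q] := by
    rw [List.getD_eq_getElem?_getD, List.getElem?_eq_getElem hq]; rfl
  rw [hgetD]
  obtain ⟨tv, hgen⟩ : ∃ tv, (RL skipL)[q] = tv := ⟨_, rfl⟩
  rw [hgen]
  have hdec : (RL skipL).countP (fun a => a ≤ tv) =
      ((RL skipL).take (q + 1)).countP (fun a => a ≤ tv) +
        ((RL skipL).drop (q + 1)).countP (fun a => a ≤ tv) := by
    conv_lhs => rw [← List.take_append_drop (q + 1) (RL skipL)]
    rw [List.countP_append]
  have hlen1 : ((RL skipL).take (q + 1)).length = q + 1 := by simp; omega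
  have h1 : ((RL skipL).take (q + 1)).countP (fun a => a ≤ tv) = q + 1 := by
    have hall : ∀ x ∈ (RL skipL).take (q + 1), decide (x ≤ tv) = true := by
      intro x hx
      obtain ⟨i, hi, hxe⟩ := List.mem_iff_getElem.1 hx
      rw [List.getElem_take] at hxe
      subst hxe
      rw [← hgen]
      simp only [decide_eq_true_eq]
      rcases Nat.lt_or_ge i q with h | h
      · exact le_of_lt (hsort i q (by omega) hq h)
      · have : i = q := by rw [hlen1] at hi; omega
        subst this; exact le_refl _
    rw [List.countP_eq_length.2 hall, hlen1]
  have h2 : ((RL skipL).drop (q + 1)).countP (fun a => a ≤ tv) = 0 := by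
    have hall : ∀ x ∈ (RL skipL).drop (q + 1), ¬ (decide (x ≤ tv) = true) := by
      intro x hx
      obtain ⟨i, hi, hxe⟩ := List.mem_iff_getElem.1 hx
      rw [List.getElem_drop] at hxe
      subst hxe
      rw [← hgen]
      simp only [decide_eq_true_eq, not_le]
      exact hsort q (q + 1 + i) hq (by simp at hi; omega) (by omega)
    exact List.countP_eq_zero.2 hall
  omega

theorem getD_mem_RL (skipL : List Char) (q : Nat) (hq : q < (RL skipL).length) :
    (RL skipL).getD q 0 ∈ RL skipL := by
  rw [List.getD_eq_getElem?_getD, List.getElem?_eq_getElem hq]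
  exact List.getElem_mem hq

theorem iterA_succ (skipL : List Char) (k : Nat) (beta : Int) :
    iterA skipL (k + 1) beta = whileSkip 26 (iterA skipL k beta + 1) skipL := by
  simp [iterA, List.range_succ]

theorem mod_succ_mod (x m : Nat) : (x % m + 1) % m = (x + 1) % m := by
  conv_rhs => rw [Nat.add_mod]
  conv_lhs => rw [Nat.add_mod, Nat.mod_mod]

-- the iteration lemma: after k ≥ 1 passes, A sits on table entry (pos + k - 1) mod m
theorem iter_core (skipL : List Char) (beta : Int) (hR : RL skipL ≠ []) :
    ∀ k, 1 ≤ k → res (iterA skipL k beta) =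
      (RL skipL).getD (((RL skipL).countP (fun a => a ≤ res beta) + (k - 1)) % (RL skipL).length) 0 := by
  have hm : 0 < (RL skipL).length := List.length_pos_iff.2 hR
  intro k hk
  induction k with
  | zero => omega
  | succ k ih =>
    rcases Nat.eq_or_lt_of_le hk with h1 | h1
    · -- k + 1 = 1
      have hk0 : k = 0 := by omega
      subst hk0
      rw [iterA_succ]
      have : iterA skipL 0 beta = beta := by simp [iterA]
      rw [this, bridge, res_succ, step_core skipL (res beta) (res_lt beta) hR]
      simp
    · have hk1 : 1 ≤ k := by omega
      have ihk := ih hk1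
      rw [iterA_succ, bridge, res_succ, ihk]
      set q := ((RL skipL).countP (fun a => a ≤ res beta) + (k - 1)) % (RL skipL).length with hqdef
      have hq : q < (RL skipL).length := Nat.mod_lt _ hm
      have hmem := getD_mem_RL skipL q hq
      have hlt26 : (RL skipL).getD q 0 < 26 := ((mem_RL skipL _).1 hmem).1
      rw [step_core skipL _ hlt26 hR, count_le_getD skipL q hq]
      have e2 : (q + 1) % (RL skipL).length =
          ((RL skipL).countP (fun a => a ≤ res beta) + (k + 1 - 1)) % (RL skipL).length := by
        rw [hqdef, mod_succ_mod]
        congr 1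
        omega
      rw [e2]

theorem charEq (skipL : List Char) (index : Int) (hok : index ≤ 0 ∨ RL skipL ≠ []) (c : Char) :
    toAlpha (iterA skipL index.toNat (c.toNat : Int)) =
      if index ≤ 0 then
        Char.ofNat ((PySem.Int.mod ((c.toNat : Int) - 97) 26).toNat + 97)
      else
        Char.ofNat ((RL skipL).getD
          (PySem.Int.mod
            (((RL skipL).countP (fun a => a ≤ (PySem.Int.mod ((c.toNat : Int) - 97) 26).toNat) : Int) + index - 1)
            ((RL skipL).length : Int)).toNat 0 + 97) := by
  have hres : (PySem.Int.mod ((c.toNat : Int) - 97) 26).toNat = res (c.toNat : Int) := by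
    rw [PySem.Int.mod_eq_emod_of_pos (by norm_num)]; rfl
  by_cases hidx : index ≤ 0
  · rw [if_pos hidx]
    have h0 : index.toNat = 0 := Int.toNat_of_nonpos hidx
    rw [h0, show iterA skipL 0 (c.toNat : Int) = (c.toNat : Int) from rfl, toAlpha_eq, hres]
  · rw [if_neg hidx]
    have hR : RL skipL ≠ [] := hok.resolve_left hidx
    have hm : 0 < (RL skipL).length := List.length_pos_iff.2 hR
    have hk : 1 ≤ index.toNat := by omega
    rw [toAlpha_eq, iter_core skipL (c.toNat : Int) hR index.toNat hk, hres]
    have hIdx : (PySem.Int.mod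
        (((RL skipL).countP (fun a => a ≤ res (c.toNat : Int)) : Int) + index - 1)
        ((RL skipL).length : Int)).toNat =
        ((RL skipL).countP (fun a => a ≤ res (c.toNat : Int)) + (index.toNat - 1)) % (RL skipL).length := by
      rw [PySem.Int.mod_eq_emod_of_pos (by exact_mod_cast hm)]
      have he : (((RL skipL).countP (fun a => a ≤ res (c.toNat : Int)) : Int) + index - 1)
          = (((RL skipL).countP (fun a => a ≤ res (c.toNat : Int)) + (index.toNat - 1) : Nat) : Int) := by
        push_cast; omega
      rw [he, show (((RL skipL).countP (fun a => a ≤ res (c.toNat : Int)) + (index.toNat - 1) : Nat) : Int) %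
          ((RL skipL).length : Int) =
          ((((RL skipL).countP (fun a => a ≤ res (c.toNat : Int)) + (index.toNat - 1)) % (RL skipL).length : Nat) : Int)
        from by push_cast; ring]
      exact Int.toNat_natCast _
    rw [hIdx]

-- ===== VERDICT (by name: the statement is the Claim_ definition above) =====
theorem solution_spec : Claim_equal_solution := by
  intro s skip index hdom hpre
  show solution s skip index = solution_alt s skip index
  have hfil : (List.range 26).filter (fun r => !(skip.toList.contains (Char.ofNat (r + 97)))) = RL skip.toList := rfl
  have hok : ∀ c : Char, c ∈ s.toList → (index ≤ 0 ∨ RL skip.toList ≠ []) := by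
    intro c hc
    rcases hpre with h | h | ⟨r, hr, hnc⟩
    · exact Or.inl h
    · rw [h] at hc; cases hc
    · refine Or.inr (List.ne_nil_of_mem ((mem_RL skip.toList r).2 ⟨by simpa using hr, by simpa [pA] using hnc⟩))
  by_cases hidx : index ≤ 0
  · simp only [solution, solution_alt, if_pos hidx, hfil,
      PySem.List.foldl_append_singleton_eq_map, List.nil_append]
    congr 1
    refine List.map_congr_left (fun c hc => ?_)
    have := charEq skip.toList index (hok c hc) c
    rw [if_pos hidx] at this
    exact this.trans rfl
  · simp only [solution, solution_alt, if_neg hidx, hfil,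
      PySem.List.foldl_append_singleton_eq_map, List.nil_append]
    congr 1
    refine List.map_congr_left (fun c hc => ?_)
    have := charEq skip.toList index (hok c hc) c
    rw [if_neg hidx] at this
    exact this.trans rfl
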